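-- pv_equiv track=rewrite | github.com/epiksel/jquery-migrate | main.py | transform_undelegate
-- ===== SOURCE A (Python) =====
-- def parse_args(s):
--     """'arg1, arg2, ...' → ['arg1', 'arg2', ...] (splits on top-level commas only)"""
--     args, current, depth = [], [], 0
--     for ch in s:
--         if ch in "([{":
--             depth += 1
--             current.append(ch)
--         elif ch in ")]}":
--             depth -= 1
--             current.append(ch)
--         elif ch == ',' and depth == 0:
--             args.append(''.join(current).strip())
--             current = []
--         else:
--             current.append(ch)
--     if current:
--         args.append(''.join(current).strip())
--     return args
--
-- def find_close_paren(content, open_pos):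
--     """Assumes content[open_pos] == '('. Returns the position after the matching ')'."""
--     assert content[open_pos] == '(', f"Expected '(' but found '{content[open_pos]}'"
--     depth, i = 1, open_pos + 1
--     while i < len(content) and depth > 0:
--         if content[i] == '(':
--             depth += 1
--         elif content[i] == ')':
--             depth -= 1
--         i += 1
--     return i  # position after ')'
--
-- def transform_undelegate(content):
--     needle = '.undelegate('
--     result, i = [], 0
--     while i < len(content):
--         pos = content.find(needle, i)
--         if pos == -1:
--             result.append(content[i:])
--             break
--         pre = content[pos - 1] if pos > 0 else ''
--         if pre.isalpha() or pre == '_':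
--             result.append(content[i: pos + 1])
--             i = pos + 1
--             continue
--         result.append(content[i:pos])
--         end = find_close_paren(content, pos + len(needle) - 1)
--         inner = content[pos + len(needle): end - 1]
--         args = parse_args(inner)
--         if len(args) == 2:
--             result.append(f".off({args[1]}, {args[0]})")
--         elif len(args) == 0:
--             result.append('.off()')
--         else:
--             result.append(content[pos:end])
--         i = end
--     return ''.join(result)
-- ===== SOURCE B (Python) =====
-- def _matching_end(content, j):
--     """j is the position right after an '('. Returns the position after the
--     ')' that closes it (or len(content) if the parens never close)."""
--     depth = 1
--     while j < len(content) and depth > 0: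
--         if content[j] == '(':
--             depth += 1
--         elif content[j] == ')':
--             depth -= 1
--         j += 1
--     return j
--
-- def _split_args(s):
--     """Split s on top-level commas into raw segments, drop a trailing empty
--     raw segment, then strip each segment."""
--     segs = [[]]
--     depth = 0
--     for ch in s:
--         if ch == ',' and depth == 0:
--             segs.append([])
--         else:
--             if ch in "([{":
--                 depth += 1
--             elif ch in ")]}":
--                 depth -= 1
--             segs[-1].append(ch)
--     if segs[-1] == []:
--         segs.pop()
--     return [''.join(seg).strip() for seg in segs]
--
-- def transform_undelegate(content):
--     needle = '.undelegate('
--     out = []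
--     i = 0
--     n = len(content)
--     while i < n:
--         if content[i:i + len(needle)] == needle and not (
--                 i > 0 and (content[i - 1].isalpha() or content[i - 1] == '_')):
--             j = _matching_end(content, i + len(needle))
--             args = _split_args(content[i + len(needle): j - 1])
--             if len(args) == 2:
--                 out.append(f".off({args[1]}, {args[0]})")
--             elif len(args) == 0:
--                 out.append('.off()')
--             else:
--                 out.append(content[i:j])
--             i = j
--         else:
--             out.append(content[i])
--             i += 1
--     return ''.join(out)
-- ===== Notes on version B (the rewrite author's own statement) =====
-- stated objective: alternative
-- what changed: Replaces the find()-and-slice outer loop with a single explicit per-character scan that tests for the needle at each position, and replaces the inline accumulator argument parser (strip-on-the-fly, conditional final append) with a raw top-level comma split followed by a uniform drop-trailing-empty-segment step and one strip pass.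
import Mathlib
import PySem

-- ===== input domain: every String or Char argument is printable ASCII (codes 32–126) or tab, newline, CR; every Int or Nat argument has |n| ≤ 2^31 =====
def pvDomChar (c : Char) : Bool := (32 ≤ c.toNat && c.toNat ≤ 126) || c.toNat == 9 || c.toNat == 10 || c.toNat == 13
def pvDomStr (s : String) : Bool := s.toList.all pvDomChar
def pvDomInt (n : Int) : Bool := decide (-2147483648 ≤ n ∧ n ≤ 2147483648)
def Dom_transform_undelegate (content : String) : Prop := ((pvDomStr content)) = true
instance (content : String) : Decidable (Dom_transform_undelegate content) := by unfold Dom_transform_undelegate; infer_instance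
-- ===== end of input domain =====

-- B rewrites the find()-based outer loop of A as a single explicit character scan, and A's
-- accumulator argument parser as raw-split + drop-trailing-empty + strip; same values, same cost.

-- needle = '.undelegate('  (both Pythons use this literal)
def pvNeedle : List Char := ['.', 'u', 'n', 'd', 'e', 'l', 'e', 'g', 'a', 't', 'e', '(']

-- ===== PORT A =====

-- parse_args: 'for ch in s' loop carrying (args, current, depth); strip applied as segments are emitted
def pvParseArgsLoop (cs : List Char) (args : List (List Char)) (cur : List Char) (depth : Int) :
    List (List Char) :=
  match cs with
  | [] => if cur ≠ [] then args ++ [PySem.Chars.strip cur] else args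
  | c :: rest =>
    if c = '(' ∨ c = '[' ∨ c = '{' then pvParseArgsLoop rest args (cur ++ [c]) (depth + 1)
    else if c = ')' ∨ c = ']' ∨ c = '}' then pvParseArgsLoop rest args (cur ++ [c]) (depth - 1)
    else if c = ',' ∧ depth = 0 then pvParseArgsLoop rest (args ++ [PySem.Chars.strip cur]) [] depth
    else pvParseArgsLoop rest args (cur ++ [c]) depth

def pvParseArgs (s : List Char) : List (List Char) := pvParseArgsLoop s [] [] 0

-- find_close_paren's while loop (while i < len and depth > 0)
def pvFindCloseLoop (s : List Char) (depth : Int) (i : Nat) : Nat :=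
  if _h : i < s.length ∧ 0 < depth then
    pvFindCloseLoop s
      (if s.getD i ' ' = '(' then depth + 1
       else if s.getD i ' ' = ')' then depth - 1 else depth) (i + 1)
  else i
termination_by s.length - i
decreasing_by omega

-- find_close_paren(content, open_pos); the assert never fires at A's call site
-- (the needle ends with '(', so content[open_pos] = '(' there)
def pvFindClose (s : List Char) (openPos : Nat) : Nat := pvFindCloseLoop s 1 (openPos + 1)

-- port lemma needed for pvLoopA's termination
theorem pvFindCloseLoop_ge (s : List Char) (depth : Int) (i : Nat) : i ≤ pvFindCloseLoop s depth i := by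
  unfold pvFindCloseLoop
  split
  · have := pvFindCloseLoop_ge s
      (if s.getD i ' ' = '(' then depth + 1
       else if s.getD i ' ' = ')' then depth - 1 else depth) (i + 1)
    omega
  · omega
termination_by s.length - i
decreasing_by omega

-- A's while loop; returns the list of appended pieces (result), joined by the wrapper
def pvLoopA (content : List Char) (i : Nat) : List (List Char) :=
  if hi : i < content.length then
    let pos := PySem.Chars.findFrom content pvNeedle (i : Int)
    if hp : pos = -1 then [content.drop i]
    else
      let p := pos.toNat
      let pre : List Char := if 0 < p then [content.getD (p - 1) ' '] else []
      if PySem.Chars.strIsalpha pre || pre = ['_'] then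
        (PySem.List.slice content (some (i : Int)) (some ((p : Int) + 1))) :: pvLoopA content (p + 1)
      else
        let e := pvFindClose content (p + pvNeedle.length - 1)
        let inner := PySem.List.slice content (some ((p : Int) + 12)) (some ((e : Int) - 1))
        let args := pvParseArgs inner
        let piece :=
          if args.length = 2 then
            ".off(".toList ++ args.getD 1 [] ++ ", ".toList ++ args.getD 0 [] ++ [')']
          else if args.length = 0 then ".off()".toList
          else PySem.List.slice content (some (p : Int)) (some (e : Int))
        (PySem.List.slice content (some (i : Int)) (some (p : Int))) :: piece :: pvLoopA content e
  else []
termination_by content.length - i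
decreasing_by
  all_goals (
    have h1 := (PySem.Chars.findFrom_natCast_spec content pvNeedle i (by omega) hp).1
    have hlen : pvNeedle.length = 12 := rfl
    first
      | omega
      | (have h2 := pvFindCloseLoop_ge content 1
            ((PySem.Chars.findFrom content pvNeedle (i : Int)).toNat + pvNeedle.length - 1 + 1)
         simp only [pvFindClose]
         omega))

-- ''.join(result) on List Char pieces is flatten (exact)
def transform_undelegate (content : String) : String :=
  String.ofList (pvLoopA content.toList 0).flatten

-- ===== PORT B =====

-- _matching_end's while loop (depth is a local of the helper, threaded through the loop)
def pvMatchEndLoop (s : List Char) (j : Nat) (depth : Int) : Nat :=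
  if _h : j < s.length ∧ 0 < depth then
    pvMatchEndLoop s (j + 1)
      (if s.getD j ' ' = '(' then depth + 1
       else if s.getD j ' ' = ')' then depth - 1 else depth)
  else j
termination_by s.length - j
decreasing_by omega

def pvMatchEnd (s : List Char) (j : Nat) : Nat := pvMatchEndLoop s j 1

-- port lemma needed for pvLoopB's termination
theorem pvMatchEndLoop_ge (s : List Char) (j : Nat) (depth : Int) : j ≤ pvMatchEndLoop s j depth := by
  unfold pvMatchEndLoop
  split
  · have := pvMatchEndLoop_ge s (j + 1)
      (if s.getD j ' ' = '(' then depth + 1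
       else if s.getD j ' ' = ')' then depth - 1 else depth)
    omega
  · omega
termination_by s.length - j
decreasing_by omega

-- _split_args' for loop: segs modelled as done ++ [cur] (cur is segs[-1])
def pvSplitGo (cs : List Char) (done : List (List Char)) (cur : List Char) (depth : Int) :
    List (List Char) :=
  match cs with
  | [] => done ++ [cur]
  | c :: rest =>
    if c = ',' ∧ depth = 0 then pvSplitGo rest (done ++ [cur]) [] depth
    else pvSplitGo rest done (cur ++ [c])
      (if c = '(' ∨ c = '[' ∨ c = '{' then depth + 1
       else if c = ')' ∨ c = ']' ∨ c = '}' then depth - 1 else depth)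

-- raw split, drop a trailing empty raw segment, strip each segment
def pvSplitArgs (s : List Char) : List (List Char) :=
  let segs := pvSplitGo s [] [] 0
  let segs := if segs.getLast? = some [] then segs.dropLast else segs
  segs.map PySem.Chars.strip

-- B's while loop; out as a list of pieces, joined by the wrapper
def pvLoopB (content : List Char) (i : Nat) : List (List Char) :=
  if hi : i < content.length then
    if PySem.List.slice content (some (i : Int)) (some ((i : Int) + 12)) = pvNeedle ∧
        ¬(0 < i ∧ (PySem.Chars.isalpha (content.getD (i - 1) ' ') ∨ content.getD (i - 1) ' ' = '_')) then
      let j := pvMatchEnd content (i + pvNeedle.length)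
      let args := pvSplitArgs (PySem.List.slice content (some ((i : Int) + 12)) (some ((j : Int) - 1)))
      (if args.length = 2 then
          ".off(".toList ++ args.getD 1 [] ++ ", ".toList ++ args.getD 0 [] ++ [')']
        else if args.length = 0 then ".off()".toList
        else PySem.List.slice content (some (i : Int)) (some (j : Int))) :: pvLoopB content j
    else [content.getD i ' '] :: pvLoopB content (i + 1)
  else []
termination_by content.length - i
decreasing_by
  all_goals (first
    | omega
    | (have := pvMatchEndLoop_ge content (i + pvNeedle.length) 1
       have hlen : pvNeedle.length = 12 := rfl
       simp only [pvMatchEnd]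
       omega))

def transform_undelegate_alt (content : String) : String :=
  String.ofList (pvLoopB content.toList 0).flatten

-- ===== PRECONDITION & SPEC =====
def Spec_transform_undelegate (content : String) (out : String) : Prop := out = transform_undelegate_alt content
instance (content : String) (out : String) : Decidable (Spec_transform_undelegate content out) := by unfold Spec_transform_undelegate; infer_instance

-- ===== CLAIM (what is proved, stated in full; the proofs are below) =====
def Claim_equal_transform_undelegate : Prop := ∀ (content : String), Dom_transform_undelegate content → Spec_transform_undelegate content (transform_undelegate content)

-- ===== LEMMAS AND PROOFS =====

-- the post-processing step of pvSplitArgs, named for the proofs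
def pvFinal (segs : List (List Char)) : List (List Char) :=
  (if segs.getLast? = some [] then segs.dropLast else segs).map PySem.Chars.strip

theorem pvSplitArgs_eq (s : List Char) : pvSplitArgs s = pvFinal (pvSplitGo s [] [] 0) := rfl

theorem pvSplitGo_append (cs : List Char) (done : List (List Char)) (cur : List Char) (d : Int) :
    pvSplitGo cs done cur d = done ++ pvSplitGo cs [] cur d := by
  induction cs generalizing done cur d with
  | nil => simp [pvSplitGo]
  | cons c rest ih =>
    by_cases h : c = ',' ∧ d = 0
    · rw [pvSplitGo, if_pos h, pvSplitGo, if_pos h, ih, ih ([] ++ [cur])]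
      simp
    · rw [pvSplitGo, if_neg h, pvSplitGo, if_neg h, ih]

theorem pvSplitGo_ne_nil (cs : List Char) (cur : List Char) (d : Int) :
    pvSplitGo cs [] cur d ≠ [] := by
  induction cs generalizing cur d with
  | nil => simp [pvSplitGo]
  | cons c rest ih =>
    by_cases h : c = ',' ∧ d = 0
    · rw [pvSplitGo, if_pos h, pvSplitGo_append]
      simp
    · rw [pvSplitGo, if_neg h]
      exact ih _ _

theorem pvFinal_cons (cur : List Char) (L : List (List Char)) (hL : L ≠ []) :
    pvFinal (cur :: L) = PySem.Chars.strip cur :: pvFinal L := by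
  unfold pvFinal
  cases L with
  | nil => exact absurd rfl hL
  | cons b M =>
    by_cases h : (b :: M).getLast? = some []
    · have e1 : (cur :: b :: M).getLast? = some [] := by rw [List.getLast?_cons_cons]; exact h
      rw [if_pos e1, if_pos h]
      simp
    · have e1 : ¬(cur :: b :: M).getLast? = some [] := by rw [List.getLast?_cons_cons]; exact h
      rw [if_neg e1, if_neg h]
      simp

theorem pvBridge (cs : List Char) (args : List (List Char)) (cur : List Char) (d : Int) :
    pvParseArgsLoop cs args cur d = args ++ pvFinal (pvSplitGo cs [] cur d) := by
  induction cs generalizing args cur d with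
  | nil =>
    rw [pvParseArgsLoop, pvSplitGo]
    by_cases h : cur = []
    · subst h; simp [pvFinal]
    · rw [if_pos h]
      simp [pvFinal, h]
  | cons c rest ih =>
    by_cases h1 : c = '(' ∨ c = '[' ∨ c = '{'
    · have hc : ¬(c = ',' ∧ d = 0) := by rcases h1 with h | h | h <;> subst h <;> simp
      rw [pvParseArgsLoop, if_pos h1, pvSplitGo, if_neg hc, if_pos h1, ih]
    · by_cases h2 : c = ')' ∨ c = ']' ∨ c = '}'
      · have hc : ¬(c = ',' ∧ d = 0) := by rcases h2 with h | h | h <;> subst h <;> simp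
        rw [pvParseArgsLoop, if_neg h1, if_pos h2, pvSplitGo, if_neg hc, if_neg h1, if_pos h2, ih]
      · by_cases h3 : c = ',' ∧ d = 0
        · rw [pvParseArgsLoop, if_neg h1, if_neg h2, if_pos h3, pvSplitGo, if_pos h3,
            pvSplitGo_append, ih]
          simp only [List.nil_append, List.singleton_append]
          rw [pvFinal_cons _ _ (pvSplitGo_ne_nil _ _ _)]
          simp
        · rw [pvParseArgsLoop, if_neg h1, if_neg h2, if_neg h3, pvSplitGo, if_neg h3,
            if_neg h1, if_neg h2, ih]

theorem pvArgs_eq (s : List Char) : pvParseArgs s = pvSplitArgs s := by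
  rw [pvParseArgs, pvSplitArgs_eq, pvBridge]
  rfl

theorem pvClose_eq (s : List Char) (d : Int) (j : Nat) :
    pvMatchEndLoop s j d = pvFindCloseLoop s d j := by
  rw [pvMatchEndLoop, pvFindCloseLoop]
  split
  · exact pvClose_eq s _ (j + 1)
  · rfl
termination_by s.length - j
decreasing_by omega

theorem pvFind_eq_self (content : List Char) (i : Nat) (hi : i < content.length)
    (hpre : pvNeedle <+: content.drop i) :
    PySem.Chars.findFrom content pvNeedle (i : Int) = (i : Int) := by
  have hne : PySem.Chars.findFrom content pvNeedle (i : Int) ≠ -1 := by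
    rw [Ne, PySem.Chars.findFrom_natCast_eq_neg_one_iff content pvNeedle i (by omega)]
    exact not_not_intro hpre.isInfix
  obtain ⟨h1, h2, h3⟩ := PySem.Chars.findFrom_natCast_spec content pvNeedle i (by omega) hne
  have h4 : (PySem.Chars.findFrom content pvNeedle (i : Int)).toNat = i := by
    by_contra hne2
    exact h3 i le_rfl (by omega) hpre
  omega

theorem pvFind_succ (content : List Char) (i : Nat) (hi : i < content.length)
    (hpre : ¬ pvNeedle <+: content.drop i) :
    PySem.Chars.findFrom content pvNeedle (i : Int) =
      PySem.Chars.findFrom content pvNeedle ((i + 1 : Nat) : Int) := by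
  have hex : ∀ k : Nat, (∃ j, pvNeedle <+: (content.drop k).drop j) ↔
      pvNeedle <:+: content.drop k := by
    intro k
    rw [PySem.Chars.exists_prefix_drop_iff_isIn, PySem.Chars.isIn_iff_infix]
  by_cases h2 : PySem.Chars.findFrom content pvNeedle ((i + 1 : Nat) : Int) = -1
  · rw [h2, PySem.Chars.findFrom_natCast_eq_neg_one_iff content pvNeedle i (by omega)]
    rw [PySem.Chars.findFrom_natCast_eq_neg_one_iff content pvNeedle (i + 1) (by omega)] at h2
    intro hinf
    obtain ⟨j, hj⟩ := (hex i).2 hinf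
    rw [List.drop_drop] at hj
    rcases Nat.eq_zero_or_pos j with hj0 | hj0
    · exact hpre (by simpa [hj0] using hj)
    · refine h2 ((hex (i + 1)).1 ⟨j - 1, ?_⟩)
      rw [List.drop_drop]
      have : i + 1 + (j - 1) = i + j := by omega
      rw [this]
      exact hj
  · obtain ⟨h1, hp2, h3⟩ := PySem.Chars.findFrom_natCast_spec content pvNeedle (i + 1) (by omega) h2
    have hne : PySem.Chars.findFrom content pvNeedle (i : Int) ≠ -1 := by
      rw [Ne, PySem.Chars.findFrom_natCast_eq_neg_one_iff content pvNeedle i (by omega), not_not]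
      refine (hex i).1 ⟨(PySem.Chars.findFrom content pvNeedle ((i + 1 : Nat) : Int)).toNat - i, ?_⟩
      rw [List.drop_drop]
      have : i + ((PySem.Chars.findFrom content pvNeedle ((i + 1 : Nat) : Int)).toNat - i) =
          (PySem.Chars.findFrom content pvNeedle ((i + 1 : Nat) : Int)).toNat := by omega
      rw [this]
      exact hp2
    obtain ⟨g1, gp2, g3⟩ := PySem.Chars.findFrom_natCast_spec content pvNeedle i (by omega) hne
    have hgi : (PySem.Chars.findFrom content pvNeedle (i : Int)).toNat ≠ i := by
      intro h
      rw [h] at gp2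
      exact hpre gp2
    have hA : ¬ (PySem.Chars.findFrom content pvNeedle (i : Int)).toNat <
        (PySem.Chars.findFrom content pvNeedle ((i + 1 : Nat) : Int)).toNat := by
      intro hlt
      exact h3 _ (by omega) hlt gp2
    have hB : ¬ (PySem.Chars.findFrom content pvNeedle ((i + 1 : Nat) : Int)).toNat <
        (PySem.Chars.findFrom content pvNeedle (i : Int)).toNat := by
      intro hlt
      exact g3 _ (by omega) hlt hp2
    omega

theorem pvSlice_nil (content : List Char) (i : Nat) :
    PySem.List.slice content (some (i : Int)) (some (i : Int)) = ([] : List Char) := by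
  rw [PySem.List.slice_natCast]
  simp

theorem pvSlice_cons (content : List Char) (i q : Nat) (hi : i < content.length) (hq : i < q) :
    PySem.List.slice content (some (i : Int)) (some (q : Int)) =
      content.getD i ' ' :: PySem.List.slice content (some ((i + 1 : Nat) : Int)) (some (q : Int)) := by
  rw [PySem.List.slice_natCast, PySem.List.slice_natCast, List.drop_eq_getElem_cons hi]
  have h1 : q - i = (q - (i + 1)) + 1 := by omega
  rw [h1, List.take_succ_cons, List.getD_eq_getElem content ' ' hi]

theorem pvSlice_needle_iff (content : List Char) (i : Nat) :
    (PySem.List.slice content (some (i : Int)) (some ((i : Int) + 12)) = pvNeedle) ↔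
      pvNeedle <+: content.drop i := by
  have h1 : ((i : Int) + 12) = ((i + 12 : Nat) : Int) := by push_cast; ring
  rw [h1, PySem.List.slice_natCast]
  have h2 : i + 12 - i = 12 := by omega
  rw [h2, List.prefix_iff_eq_take]
  have h3 : pvNeedle.length = 12 := rfl
  rw [h3, eq_comm]

theorem pvGuard_iff (content : List Char) (i : Nat) :
    (PySem.Chars.strIsalpha (if 0 < i then [content.getD (i - 1) ' '] else []) ||
      decide ((if 0 < i then [content.getD (i - 1) ' '] else []) = ['_'])) = true ↔
    (0 < i ∧ (PySem.Chars.isalpha (content.getD (i - 1) ' ') = true ∨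
      content.getD (i - 1) ' ' = '_')) := by
  by_cases h : 0 < i <;> simp [h, PySem.Chars.strIsalpha]

theorem pvLoopA_copy (content : List Char) (i : Nat) (hi : i < content.length)
    (hpre : ¬ pvNeedle <+: content.drop i) :
    (pvLoopA content i).flatten = content.getD i ' ' :: (pvLoopA content (i + 1)).flatten := by
  have hdrop : List.drop i content = content.getD i ' ' :: List.drop (i + 1) content := by
    rw [List.drop_eq_getElem_cons hi, List.getD_eq_getElem content ' ' hi]
  rw [pvLoopA]
  simp only [dif_pos hi]
  rw [pvFind_succ content i hi hpre]
  by_cases h2 : PySem.Chars.findFrom content pvNeedle ((i + 1 : Nat) : Int) = -1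
  · rw [dif_pos h2]
    by_cases hi1 : i + 1 < content.length
    · rw [pvLoopA, dif_pos hi1, dif_pos h2]
      simp [hdrop]
    · rw [pvLoopA, dif_neg hi1]
      have hlen : content.length ≤ i + 1 := by omega
      simp [hdrop, List.drop_eq_nil_of_le hlen]
  · rw [dif_neg h2]
    obtain ⟨h1, hp2, h3⟩ := PySem.Chars.findFrom_natCast_spec content pvNeedle (i + 1) (by omega) h2
    have h12 : pvNeedle.length = 12 := rfl
    have hqlen : (PySem.Chars.findFrom content pvNeedle ((i + 1 : Nat) : Int)).toNat <
        content.length := by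
      have hle := hp2.length_le
      simp only [List.length_drop] at hle
      omega
    conv_rhs => rw [pvLoopA]
    rw [dif_pos (by omega : i + 1 < content.length), dif_neg h2]
    set q := (PySem.Chars.findFrom content pvNeedle ((i + 1 : Nat) : Int)).toNat with hq
    have hq1 : i + 1 ≤ q := by omega
    by_cases hg : (PySem.Chars.strIsalpha (if 0 < q then [content.getD (q - 1) ' '] else []) ||
        decide ((if 0 < q then [content.getD (q - 1) ' '] else []) = ['_'])) = true
    · rw [if_pos hg, if_pos hg]
      simp only [List.flatten_cons]
      rw [show ((q : Int) + 1) = ((q + 1 : Nat) : Int) by push_cast; ring,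
        pvSlice_cons content i (q + 1) hi (by omega)]
      simp
    · rw [if_neg hg, if_neg hg]
      simp only [List.flatten_cons]
      rw [pvSlice_cons content i q hi (by omega)]
      simp

theorem pvMainAux (content : List Char) (n : Nat) :
    ∀ i, content.length - i ≤ n → (pvLoopA content i).flatten = (pvLoopB content i).flatten := by
  induction n with
  | zero =>
    intro i h
    rw [pvLoopA, pvLoopB, dif_neg (by omega), dif_neg (by omega)]
  | succ n ih =>
    intro i hn
    by_cases hi : i < content.length
    · by_cases hpre : pvNeedle <+: content.drop i
      · -- the needle matches at i
        have hfind := pvFind_eq_self content i hi hpre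
        rw [pvLoopA, dif_pos hi, hfind, dif_neg (by omega : ¬ (i : Int) = -1)]
        simp only [Int.toNat_natCast]
        by_cases hg : 0 < i ∧ (PySem.Chars.isalpha (content.getD (i - 1) ' ') = true ∨
            content.getD (i - 1) ' ' = '_')
        · -- a real method call before the dot: both sides skip past the dot
          rw [if_pos ((pvGuard_iff content i).2 hg)]
          rw [pvLoopB, dif_pos hi, if_neg (fun hc => hc.2 hg)]
          simp only [List.flatten_cons]
          rw [show ((i : Int) + 1) = ((i + 1 : Nat) : Int) by push_cast; ring,
            pvSlice_cons content i (i + 1) hi (by omega), pvSlice_nil]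
          rw [ih (i + 1) (by omega)]
        · -- both sides rewrite the call
          rw [if_neg (fun h => hg ((pvGuard_iff content i).1 h))]
          have hcond : PySem.List.slice content (some (i : Int)) (some ((i : Int) + 12)) =
              pvNeedle ∧ ¬(0 < i ∧ (PySem.Chars.isalpha (content.getD (i - 1) ' ') = true ∨
                content.getD (i - 1) ' ' = '_')) :=
            ⟨(pvSlice_needle_iff content i).2 hpre, hg⟩
          rw [pvLoopB, dif_pos hi, if_pos hcond]
          have hlen12 : pvNeedle.length = 12 := rfl
          have hE : pvFindClose content (i + pvNeedle.length - 1) =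
              pvFindCloseLoop content 1 (i + 12) := by
            rw [pvFindClose, hlen12]
            congr 1
          have hJ : pvMatchEnd content (i + pvNeedle.length) =
              pvFindCloseLoop content 1 (i + 12) := by
            rw [pvMatchEnd, hlen12, pvClose_eq]
          rw [hE, hJ, pvArgs_eq]
          have hge := pvFindCloseLoop_ge content 1 (i + 12)
          simp only [List.flatten_cons]
          rw [pvSlice_nil, ih (pvFindCloseLoop content 1 (i + 12)) (by omega)]
          simp
      · -- no match at i: both sides copy one character
        rw [pvLoopA_copy content i hi hpre]
        rw [pvLoopB, dif_pos hi,
          if_neg (fun hc => hpre ((pvSlice_needle_iff content i).1 hc.1))]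
        simp only [List.flatten_cons, List.singleton_append]
        rw [ih (i + 1) (by omega)]
    · rw [pvLoopA, pvLoopB, dif_neg hi, dif_neg hi]

theorem pvMain (content : List Char) (i : Nat) :
    (pvLoopA content i).flatten = (pvLoopB content i).flatten :=
  pvMainAux content (content.length - i) i le_rfl

-- ===== VERDICT (by name: the statement is the Claim_ definition above) =====
theorem transform_undelegate_spec : Claim_equal_transform_undelegate := by
  intro content _
  unfold Spec_transform_undelegate transform_undelegate transform_undelegate_alt
  rw [pvMain]
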